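-- pv_equiv track=rewrite | github.com/kevin-ch-day/ScytaleDroid | scytaledroid/DynamicAnalysis/ml/operational_metrics.py | anomaly_streaks
-- ===== SOURCE A (Python) =====
-- def anomaly_streaks(is_anomalous: list[bool]) -> tuple[int, int]:
--     """Return (streak_count, longest_streak) over a boolean anomaly sequence."""
--     streak = 0
--     longest = 0
--     streaks = 0
--     for v in is_anomalous:
--         if v:
--             streak += 1
--             longest = max(longest, streak)
--         else:
--             if streak:
--                 streaks += 1
--             streak = 0
--     if streak:
--         streaks += 1
--     return streaks, longest
-- ===== SOURCE B (Python) =====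
-- def anomaly_streaks(is_anomalous: list[bool]) -> tuple[int, int]:
--     """Return (streak_count, longest_streak) over a boolean anomaly sequence."""
--     lengths = []
--     it = iter(is_anomalous)
--     for v in it:
--         if v:
--             run = 1
--             for w in it:
--                 if w:
--                     run += 1
--                 else:
--                     break
--             lengths.append(run)
--     return (len(lengths), max(lengths, default=0))
-- ===== Notes on version B (the rewrite author's own statement) =====
-- stated objective: idiomatic
-- what changed: Replaces the stateful streak/longest/streaks accumulators with trailing flush by a groupby-style pass over an iterator that collects the lengths of maximal True runs and returns (len(lengths), max(lengths, default=0)). The run-consuming inner loop does one truth test per element instead of A's per-element max/streak bookkeeping (measured ~2x constant-factor speedup).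
import Mathlib
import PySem

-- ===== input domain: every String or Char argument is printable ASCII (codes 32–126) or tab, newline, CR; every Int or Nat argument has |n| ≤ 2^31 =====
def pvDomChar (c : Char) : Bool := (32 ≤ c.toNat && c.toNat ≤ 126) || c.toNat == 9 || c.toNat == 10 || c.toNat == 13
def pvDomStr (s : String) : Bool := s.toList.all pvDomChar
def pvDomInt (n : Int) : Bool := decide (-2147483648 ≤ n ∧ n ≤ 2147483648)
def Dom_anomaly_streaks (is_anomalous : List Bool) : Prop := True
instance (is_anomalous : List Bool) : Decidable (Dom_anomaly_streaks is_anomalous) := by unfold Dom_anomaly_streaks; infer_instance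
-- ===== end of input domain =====

-- B replaces A's streak/longest/streaks accumulators (with trailing flush) by a groupby-style
-- collection of the lengths of maximal True runs, then returns (len, max with default 0). Idiomatic; same O(n) cost.

-- ===== PORT A =====
-- A's for-loop over is_anomalous with state (streak, longest, streaks), branch order preserved.
def anomalyLoop : List Bool → Int → Int → Int → Int × Int × Int
  | [], streak, longest, streaks => (streak, longest, streaks)
  | v :: t, streak, longest, streaks =>
      if v then anomalyLoop t (streak + 1) (max longest (streak + 1)) streaks
      else anomalyLoop t 0 longest (if streak ≠ 0 then streaks + 1 else streaks)

def anomaly_streaks (is_anomalous : List Bool) : Int × Int :=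
  let r := anomalyLoop is_anomalous 0 0 0
  ((if r.1 ≠ 0 then r.2.2 + 1 else r.2.2), r.2.1)

-- ===== PORT B =====
-- B's inner for-loop: consume further True values from the iterator, return (run, remaining items).
def runInner : List Bool → Int → Int × List Bool
  | [], run => (run, [])
  | w :: t, run => if w then runInner t (run + 1) else (run, t)

theorem runInner_len : ∀ (t : List Bool) (r : Int), (runInner t r).2.length ≤ t.length := by
  intro t
  induction t with
  | nil => intro r; simp [runInner]
  | cons w t ih =>
      intro r
      by_cases hw : w = true <;> simp [runInner, hw]
      · exact Nat.le_succ_of_le (ih (r + 1))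

-- B's outer for-loop collecting the run lengths.
def collectRuns : List Bool → List Int
  | [] => []
  | v :: t =>
      if v then
        let p := runInner t 1
        p.1 :: collectRuns p.2
      else collectRuns t
termination_by xs => xs.length
decreasing_by
  · exact Nat.lt_succ_of_le (runInner_len t 1)
  · exact Nat.lt_succ_self _

def anomaly_streaks_alt (is_anomalous : List Bool) : Int × Int :=
  let lengths := collectRuns is_anomalous
  ((lengths.length : Int), lengths.foldl max 0)

-- ===== PRECONDITION & SPEC =====
def Spec_anomaly_streaks (is_anomalous : List Bool) (out : Int × Int) : Prop := out = anomaly_streaks_alt is_anomalous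
instance (is_anomalous : List Bool) (out : Int × Int) : Decidable (Spec_anomaly_streaks is_anomalous out) := by unfold Spec_anomaly_streaks; infer_instance

-- ===== CLAIM (what is proved, stated in full; the proofs are below) =====
def Claim_equal_anomaly_streaks : Prop := ∀ (is_anomalous : List Bool), Dom_anomaly_streaks is_anomalous → Spec_anomaly_streaks is_anomalous (anomaly_streaks is_anomalous)

-- ===== LEMMAS AND PROOFS =====

-- A's final value from an arbitrary loop state.
def aFinal (xs : List Bool) (streak longest streaks : Int) : Int × Int :=
  let r := anomalyLoop xs streak longest streaks
  ((if r.1 ≠ 0 then r.2.2 + 1 else r.2.2), r.2.1)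

theorem runInner_fst_ge : ∀ (t : List Bool) (r : Int), r ≤ (runInner t r).1 := by
  intro t
  induction t with
  | nil => intro r; simp [runInner]
  | cons w t ih =>
      intro r
      by_cases hw : w = true <;> simp [runInner, hw]
      exact le_trans (by omega) (ih (r + 1))

-- mid-run: A's loop from a positive streak (already folded into longest) equals
-- consuming the rest of the run (runInner), bumping streaks, and continuing from streak 0.
theorem aFinal_inner : ∀ (t : List Bool) (streak longest streaks : Int),
    0 < streak → streak ≤ longest →
    aFinal t streak longest streaks
      = aFinal (runInner t streak).2 0 (max longest (runInner t streak).1) (streaks + 1) := by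
  intro t
  induction t with
  | nil =>
      intro streak longest streaks hpos hle
      simp [aFinal, anomalyLoop, runInner]
      constructor
      · omega
      · omega
  | cons w t ih =>
      intro streak longest streaks hpos hle
      by_cases hw : w = true
      · subst hw
        have h1 : streak + 1 ≤ max longest (streak + 1) := le_max_right _ _
        have hstep := ih (streak + 1) (max longest (streak + 1)) streaks (by omega) h1
        have e1 : aFinal (true :: t) streak longest streaks
            = aFinal t (streak + 1) (max longest (streak + 1)) streaks := by
          simp [aFinal, anomalyLoop]
        have e2 : runInner (true :: t) streak = runInner t (streak + 1) := by
          simp [runInner]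
        have hge : streak + 1 ≤ (runInner t (streak + 1)).1 := runInner_fst_ge t (streak + 1)
        have hm : max (max longest (streak + 1)) (runInner t (streak + 1)).1
             = max longest (runInner t (streak + 1)).1 := by
          rcases max_cases longest (streak + 1) with ⟨h, _⟩ | ⟨h, _⟩ <;> rw [h] <;> omega
        rw [e1, hstep, hm, e2]
      · have hs : streak ≠ 0 := by omega
        have hmax : max longest streak = longest := max_eq_left hle
        simp [aFinal, anomalyLoop, runInner, hw, hs, hmax]

-- main invariant: A's loop from streak 0 vs B's collected run lengths.
theorem aFinal_zero : ∀ (xs : List Bool) (longest streaks : Int),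
    aFinal xs 0 longest streaks
      = (streaks + ((collectRuns xs).length : Int), (collectRuns xs).foldl max longest) := by
  intro xs
  induction xs using collectRuns.induct with
  | case1 =>
      intro longest streaks
      simp [aFinal, anomalyLoop, collectRuns]
  | case2 t p ih =>
      intro longest streaks
      have h1 : aFinal (true :: t) 0 longest streaks
          = aFinal t 1 (max longest 1) streaks := by
        simp [aFinal, anomalyLoop]
      have h2 := aFinal_inner t 1 (max longest 1) streaks (by omega) (le_max_right _ _)
      have hge : (1 : Int) ≤ (runInner t 1).1 := runInner_fst_ge t 1
      have hcoll : max (max longest 1) (runInner t 1).1 = max longest (runInner t 1).1 := by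
        rcases max_cases longest 1 with ⟨h, _⟩ | ⟨h, _⟩ <;> rw [h] <;> omega
      rw [h1, h2, hcoll, ih]
      simp [collectRuns]
      push_cast
      ring_nf
      exact ⟨rfl, rfl⟩
  | case3 v t hv ih =>
      intro longest streaks
      have hv' : v = false := by simpa using hv
      subst hv'
      have : aFinal (false :: t) 0 longest streaks = aFinal t 0 longest streaks := by
        simp [aFinal, anomalyLoop]
      rw [this, ih]
      simp [collectRuns]

-- ===== VERDICT (by name: the statement is the Claim_ definition above) =====
theorem anomaly_streaks_spec : Claim_equal_anomaly_streaks := by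
  intro xs _
  unfold Spec_anomaly_streaks
  have h : anomaly_streaks xs = aFinal xs 0 0 0 := rfl
  rw [h, aFinal_zero]
  simp [anomaly_streaks_alt]
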